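-- pv_equiv track=rewrite | github.com/Liujia127/PLC-Transition-Sequence | huafen/main.py | group_substrings
-- ===== SOURCE A (Python) =====
-- def group_substrings(result_set):
--     substring_groups = {}  # 用于存储子串和父串的关系
--
--     for substring in result_set:
--         found_parent = False
--         for parent, children in substring_groups.items():
--             if substring.startswith(parent):
--                 children.append(substring)
--                 found_parent = True
--                 break
--         if not found_parent:
--             substring_groups[substring] = []
--
--     return substring_groups
-- ===== SOURCE B (Python) =====
-- def group_substrings(result_set):
--     groups = {}
--     for s in result_set:
--         # find the longest prefix of s that is already a group key
--         # (keys are never prefixes of later keys, so the longest prefix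
--         #  key is exactly the first matching key in insertion order)
--         p = s
--         while not (p in groups or len(p) == 0):
--             p = p[:-1]
--         if p in groups:
--             groups[p].append(s)
--         else:
--             groups[s] = []
--     return groups
-- ===== Notes on version B (the rewrite author's own statement) =====
-- stated objective: faster
-- what changed: Instead of scanning every existing group key for each substring (first prefix match in insertion order), B finds the group by repeatedly chopping the last character off the substring and doing a hash lookup, i.e. longest-prefix search; since no key is ever a prefix of a later key, the longest key-prefix is exactly A's first match.
import Mathlib
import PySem

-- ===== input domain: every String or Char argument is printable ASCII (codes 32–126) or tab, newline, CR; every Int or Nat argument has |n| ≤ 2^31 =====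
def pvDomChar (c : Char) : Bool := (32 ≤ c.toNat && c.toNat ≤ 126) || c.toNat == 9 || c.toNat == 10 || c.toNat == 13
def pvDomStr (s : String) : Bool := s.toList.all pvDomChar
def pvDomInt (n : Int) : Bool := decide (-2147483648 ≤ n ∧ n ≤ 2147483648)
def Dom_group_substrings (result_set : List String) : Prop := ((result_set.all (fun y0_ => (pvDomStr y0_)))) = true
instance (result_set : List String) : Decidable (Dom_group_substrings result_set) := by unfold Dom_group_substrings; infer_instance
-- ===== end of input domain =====

-- B replaces A's linear scan over all existing groups by a longest-prefix search over the
-- suffix-shrinking prefixes of each substring with a dict lookup (objective: faster; A mutates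
-- the lists stored in its dict in place, B likewise builds its dict in place; return value proved equal).


-- ===== PORT A =====
-- inner for-loop with break = first (parent, children) item whose key is a prefix of substring
def stepA (d : PySem.Dict String (List String)) (s : String) : PySem.Dict String (List String) :=
  match d.items.find? (fun pc => PySem.Str.startswith s pc.1) with
  | some pc => d.modify pc.1 [] (fun cs => cs ++ [s])   -- children.append(substring)
  | none    => d.insert s []                            -- substring_groups[substring] = []

def group_substrings (result_set : List String) : List (String × List String) :=
  (result_set.foldl stepA PySem.Dict.empty).items

-- ===== PORT B =====
-- while not (p in groups or len(p) == 0): p = p[:-1]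
def findParent (d : PySem.Dict String (List String)) (p : String) : String :=
  if d.contains p || PySem.Str.len p == 0 then p
  else findParent d (PySem.Str.slice p none (some (-1)))
termination_by p.toList.length
decreasing_by
  rename_i h
  simp only [Bool.or_eq_true, beq_iff_eq, not_or, PySem.Str.len_eq] at h
  rw [show (PySem.Str.slice p none (some (-1))).toList = p.toList.dropLast from
      PySem.Str.slice_to_neg_one p, List.length_dropLast]
  omega

def stepB (d : PySem.Dict String (List String)) (s : String) : PySem.Dict String (List String) :=
  let p := findParent d s
  if d.contains p then d.modify p [] (fun cs => cs ++ [s]) else d.insert s []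

def group_substrings_alt (result_set : List String) : List (String × List String) :=
  (result_set.foldl stepB PySem.Dict.empty).items

-- ===== PRECONDITION & SPEC =====
def Spec_group_substrings (result_set : List String) (out : List (String × List String)) : Prop := out = group_substrings_alt result_set
instance (result_set : List String) (out : List (String × List String)) : Decidable (Spec_group_substrings result_set out) := by unfold Spec_group_substrings; infer_instance

-- ===== CLAIM (what is proved, stated in full; the proofs are below) =====
def Claim_equal_group_substrings : Prop := ∀ (result_set : List String), Dom_group_substrings result_set → Spec_group_substrings result_set (group_substrings result_set)

-- ===== LEMMAS AND PROOFS =====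

-- The loop invariant: keys are distinct and no key is a prefix of a LATER key.
def PInv (d : PySem.Dict String (List String)) : Prop :=
  d.keys.Nodup ∧ d.keys.Pairwise (fun a b => ¬ a.toList <+: b.toList)

-- findParent returns a prefix of its argument
theorem findParent_prefix (d : PySem.Dict String (List String)) (p : String) :
    (findParent d p).toList <+: p.toList := by
  rw [findParent.eq_def]
  split
  · exact List.prefix_rfl
  · rename_i h
    have hstep : (PySem.Str.slice p none (some (-1))).toList = p.toList.dropLast :=
      PySem.Str.slice_to_neg_one p
    have ih := findParent_prefix d (PySem.Str.slice p none (some (-1)))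
    refine ih.trans ?_
    rw [hstep]
    exact List.dropLast_prefix p.toList
termination_by p.toList.length
decreasing_by
  rename_i h
  simp only [Bool.or_eq_true, beq_iff_eq, not_or, PySem.Str.len_eq] at h
  rw [show (PySem.Str.slice p none (some (-1))).toList = p.toList.dropLast from
      PySem.Str.slice_to_neg_one p, List.length_dropLast]
  omega

-- If no prefix of p is a key, findParent lands on a non-key
theorem findParent_none (d : PySem.Dict String (List String)) (p : String)
    (h : ∀ q : String, q.toList <+: p.toList → d.contains q = false) :
    d.contains (findParent d p) = false :=
  h _ (findParent_prefix d p)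

-- If q is a key-prefix of p of maximal length, findParent finds q
theorem findParent_some (d : PySem.Dict String (List String)) (p q : String)
    (hq : q.toList <+: p.toList) (hc : d.contains q = true)
    (hmax : ∀ q' : String, q'.toList <+: p.toList → q.toList.length < q'.toList.length →
      d.contains q' = false) :
    findParent d p = q := by
  rw [findParent.eq_def]
  split
  · rename_i h
    -- either p is a key, or p is empty; in both cases q = p
    have hqlen : q.toList.length ≤ p.toList.length := hq.length_le
    rcases Nat.lt_or_ge q.toList.length p.toList.length with hlt | hge
    · -- then p itself would be a longer key-prefix or p empty contradiction
      simp only [PySem.Str.len_eq, Bool.or_eq_true, beq_iff_eq] at h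
      rcases h with h | h
      · have := hmax p List.prefix_rfl hlt
        rw [this] at h; exact absurd h (by simp)
      · omega
    · have : q.toList = p.toList := hq.eq_of_length_le (by omega)
      exact (String.toList_inj.mp this).symm
  · rename_i h
    simp only [PySem.Str.len_eq, Bool.or_eq_true, beq_iff_eq, not_or] at h
    obtain ⟨hnc, hne⟩ := h
    have hstep : (PySem.Str.slice p none (some (-1))).toList = p.toList.dropLast :=
      PySem.Str.slice_to_neg_one p
    have hqne : q.toList ≠ p.toList := by
      intro he
      have : q = p := String.toList_inj.mp he
      rw [this] at hc; rw [hc] at hnc; exact absurd hnc (by simp)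
    have hqlt : q.toList.length < p.toList.length := by
      have := hq.length_le
      rcases Nat.lt_or_ge q.toList.length p.toList.length with h' | h'
      · exact h'
      · exact absurd (hq.eq_of_length_le (by omega)) hqne
    have hq' : q.toList <+: (PySem.Str.slice p none (some (-1))).toList := by
      rw [hstep]
      rw [List.dropLast_eq_take, List.prefix_take_iff]
      exact ⟨hq, by omega⟩
    exact findParent_some d _ q hq' hc (fun q' hp' hl' =>
      hmax q' (hp'.trans (by rw [hstep]; exact List.dropLast_prefix _)) hl')
termination_by p.toList.length
decreasing_by
  rename_i h
  simp only [Bool.or_eq_true, beq_iff_eq, not_or, PySem.Str.len_eq] at h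
  rw [show (PySem.Str.slice p none (some (-1))).toList = p.toList.dropLast from
      PySem.Str.slice_to_neg_one p, List.length_dropLast]
  omega

theorem sw_iff (s p : String) : PySem.Str.startswith s p = true ↔ p.toList <+: s.toList := by
  simp only [PySem.Str.startswith_eq, PySem.Chars.startswith_iff]

theorem mem_keys_contains (d : PySem.Dict String (List String)) (q : String) :
    d.contains q = true ↔ q ∈ d.keys := by
  simp only [PySem.Dict.contains_eq_decide_mem_keys, decide_eq_true_eq]

-- in the "no parent found" case, no key of d is a prefix of s
theorem no_parent (d : PySem.Dict String (List String)) (s : String)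
    (h : d.items.find? (fun pc => PySem.Str.startswith s pc.1) = none) :
    ∀ q : String, q ∈ d.keys → ¬ q.toList <+: s.toList := by
  intro q hq hpre
  have hq' : q ∈ d.items.map Prod.fst := hq
  obtain ⟨pc, hpc, rfl⟩ := List.mem_map.mp hq'
  have := List.find?_eq_none.mp h pc hpc
  exact this ((sw_iff s pc.1).mpr hpre)

-- in the "parent found" case, the parent is the LONGEST key-prefix of s
theorem first_is_longest (d : PySem.Dict String (List String)) (s : String)
    (pc : String × List String) (hinv : PInv d)
    (h : d.items.find? (fun pc => PySem.Str.startswith s pc.1) = some pc) :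
    pc.1.toList <+: s.toList ∧ d.contains pc.1 = true ∧
      ∀ q : String, q.toList <+: s.toList → pc.1.toList.length < q.toList.length →
        d.contains q = false := by
  obtain ⟨hp, as, bs, hsplit, hbefore⟩ := List.find?_eq_some_iff_append.mp h
  have hpre : pc.1.toList <+: s.toList := (sw_iff s pc.1).mp hp
  have hmem : pc.1 ∈ d.keys := by
    show pc.1 ∈ d.items.map Prod.fst
    rw [hsplit]; simp
  refine ⟨hpre, (mem_keys_contains d pc.1).mpr hmem, ?_⟩
  intro q hqpre hqlen
  by_contra hc
  have hqmem : q ∈ d.keys := (mem_keys_contains d q).mp (by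
    cases hce : d.contains q with
    | true  => rfl
    | false => exact absurd hce hc)
  have hkeys : d.keys = as.map Prod.fst ++ pc.1 :: bs.map Prod.fst := by
    show d.items.map Prod.fst = _
    rw [hsplit]; simp
  rw [hkeys] at hqmem
  rcases List.mem_append.mp hqmem with hqa | hqb
  · -- q appears before pc.1: it did not match, so it is not a prefix of s
    obtain ⟨a, ha, rfl⟩ := List.mem_map.mp hqa
    have := hbefore a ha
    exact absurd ((sw_iff s a.1).mpr hqpre) (by simp_all)
  · rcases List.mem_cons.mp hqb with rfl | hqb'
    · omega
    · -- q appears after pc.1: by the invariant pc.1 is not a prefix of q, so q,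
      -- being a co-prefix of s, is a shorter prefix of pc.1 — contradiction
      have hpw := hinv.2
      rw [hkeys] at hpw
      have hrel : ¬ pc.1.toList <+: q.toList := by
        have := (List.pairwise_append.mp hpw).2.1
        exact (List.pairwise_cons.mp this).1 q hqb'
      rcases List.prefix_or_prefix_of_prefix hpre hqpre with h1 | h2
      · exact hrel h1
      · have := h2.length_le; omega

theorem step_eq (d : PySem.Dict String (List String)) (s : String) (hinv : PInv d) :
    stepA d s = stepB d s := by
  unfold stepA stepB
  cases hf : d.items.find? (fun pc => PySem.Str.startswith s pc.1) with
  | none =>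
    have hnc : d.contains (findParent d s) = false := by
      apply findParent_none
      intro q hq
      cases hce : d.contains q with
      | false => rfl
      | true  =>
        exact absurd hq (no_parent d s hf q ((mem_keys_contains d q).mp hce))
    simp [hnc]
  | some pc =>
    obtain ⟨hpre, hc, hmax⟩ := first_is_longest d s pc hinv hf
    have hfp : findParent d s = pc.1 := findParent_some d s pc.1 hpre hc hmax
    simp [hfp, hc]

theorem step_inv (d : PySem.Dict String (List String)) (s : String) (hinv : PInv d) :
    PInv (stepA d s) := by
  unfold stepA
  cases hf : d.items.find? (fun pc => PySem.Str.startswith s pc.1) with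
  | none =>
    have hnc : d.contains s = false := by
      cases hce : d.contains s with
      | false => rfl
      | true  =>
        exact absurd List.prefix_rfl (no_parent d s hf s ((mem_keys_contains d s).mp hce))
    have hkeys : (d.insert s ([] : List String)).keys = d.keys ++ [s] :=
      PySem.Dict.keys_insert_of_not_contains d ([] : List String) hnc
    constructor
    · rw [hkeys]
      refine List.Nodup.append hinv.1 (List.nodup_singleton s) ?_
      intro a ha hb
      rw [List.mem_singleton] at hb; subst hb
      rw [← mem_keys_contains] at ha
      rw [ha] at hnc; exact absurd hnc (by simp)
    · rw [hkeys, List.pairwise_append]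
      refine ⟨hinv.2, List.pairwise_singleton _ _, ?_⟩
      intro a ha b hb
      rw [List.mem_singleton] at hb
      rw [hb]
      exact no_parent d s hf a ha
  | some pc =>
    have hmem : pc.1 ∈ d.keys := by
      rw [← mem_keys_contains]
      exact (first_is_longest d s pc hinv hf).2.1
    have hkeys : (d.modify pc.1 [] (fun cs => cs ++ [s])).keys = d.keys := by
      rw [PySem.Dict.keys_modify]
      exact PySem.Dict.keys_insert_of_contains d _ ((mem_keys_contains d pc.1).mpr hmem)
    exact ⟨hkeys ▸ hinv.1, hkeys ▸ hinv.2⟩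

theorem foldl_eq (l : List String) (d : PySem.Dict String (List String)) (hinv : PInv d) :
    l.foldl stepA d = l.foldl stepB d := by
  induction l generalizing d with
  | nil => rfl
  | cons x xs ih =>
    simp only [List.foldl_cons]
    rw [← step_eq d x hinv]
    exact ih _ (step_inv d x hinv)

-- ===== VERDICT (by name: the statement is the Claim_ definition above) =====
theorem group_substrings_spec : Claim_equal_group_substrings := by
  intro result_set _
  unfold Spec_group_substrings group_substrings group_substrings_alt
  rw [foldl_eq result_set PySem.Dict.empty ⟨by simp, by simp⟩]
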